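-- pv_equiv track=rewrite | github.com/TheBlupper/coppersmith | coppersmith.py | find_exps
-- ===== SOURCE A (Python) =====
-- def find_exps(assignemnt, remaining, weights):
--     i = len(assignemnt)
--     if i == len(weights):
--         yield assignemnt
--         return
--
--     weight = weights[i]
--     for j in range(remaining + 1):
--         new_remaining = remaining - j * weight
--         if new_remaining < 0:
--             break
--         yield from find_exps(assignemnt + (j,), new_remaining, weights)
-- ===== SOURCE B (Python) =====
-- def find_exps(assignemnt, remaining, weights):
--     # Level-by-level expansion: fold over the remaining weights, expanding every
--     # partial state in order; leaves appear in the same lexicographic order.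
--     states = [(assignemnt, remaining)]
--     for w in weights[len(assignemnt):]:
--         states = [(a + (j,), r - j * w)
--                   for a, r in states
--                   for j in range(r + 1)
--                   if r - j * w >= 0]
--     yield from (a for a, _ in states)
-- ===== Notes on version B (the rewrite author's own statement) =====
-- stated objective: alternative
-- what changed: Replaces the depth-first recursive generator by a breadth-first level fold: a single loop over the remaining weights expands a flat list of (assignment, remaining) states with a comprehension, then yields all completed assignments; leaf order stays lexicographic because all leaves sit at the same depth.
import Mathlib
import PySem

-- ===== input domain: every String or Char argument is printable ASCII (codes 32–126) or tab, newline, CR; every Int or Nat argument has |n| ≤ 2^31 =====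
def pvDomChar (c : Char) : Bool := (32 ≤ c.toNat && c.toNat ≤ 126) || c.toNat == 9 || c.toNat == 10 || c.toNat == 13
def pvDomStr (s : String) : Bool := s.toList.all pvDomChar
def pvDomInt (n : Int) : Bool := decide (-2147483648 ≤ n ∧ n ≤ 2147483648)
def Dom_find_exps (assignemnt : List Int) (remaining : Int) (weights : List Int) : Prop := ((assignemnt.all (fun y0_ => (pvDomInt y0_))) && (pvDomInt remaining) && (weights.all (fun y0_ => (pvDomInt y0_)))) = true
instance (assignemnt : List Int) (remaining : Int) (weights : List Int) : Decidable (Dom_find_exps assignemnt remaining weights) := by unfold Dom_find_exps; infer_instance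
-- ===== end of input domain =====

-- B replaces A's depth-first recursive generator by a breadth-first fold over the
-- remaining weights (alternative decomposition, same enumeration order and cost).


-- ===== PORT A =====
-- Literal port of A's recursion; the Nat depth argument d is only fuel making the
-- well-founded mutual recursion total (it never changes the computed value on Pre_).
mutual
def find_exps_go : Nat → List Int → Int → List Int → List (List Int)
  | 0, _, _, _ => []
  | Nat.succ d, a, remaining, weights =>
    if a.length = weights.length then [a]
    else
      match PySem.List.pyGet? weights (a.length : Int) with
      | none => []   -- weights[i] raises IndexError in Python; excluded by Pre_
      | some weight => find_exps_loop d a remaining weights weight ((remaining + 1).toNat) 0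
termination_by d _ _ _ => (d, 0)

-- the 'for j in range(remaining + 1)' loop: fuel counts the remaining iterations, j is the counter
def find_exps_loop : Nat → List Int → Int → List Int → Int → Nat → Int → List (List Int)
  | _, _, _, _, _, 0, _ => []
  | d, a, remaining, weights, weight, Nat.succ f, j =>
    if remaining - j * weight < 0 then []
    else find_exps_go d (a ++ [j]) (remaining - j * weight) weights ++
         find_exps_loop d a remaining weights weight f (j + 1)
termination_by d _ _ _ _ f _ => (d, f + 1)
end


def find_exps (assignemnt : List Int) (remaining : Int) (weights : List Int) : List (List Int) :=
  find_exps_go (weights.length + 1) assignemnt remaining weights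

-- ===== PORT B =====
-- one level of B's comprehension: expand every state by the feasible next exponents
def find_exps_expand (states : List (List Int × Int)) (w : Int) : List (List Int × Int) :=
  states.flatMap (fun p =>
    (PySem.List.pyRange 0 (p.2 + 1) 1).filterMap (fun j =>
      if 0 ≤ p.2 - j * w then some (p.1 ++ [j], p.2 - j * w) else none))

def find_exps_alt (assignemnt : List Int) (remaining : Int) (weights : List Int) : List (List Int) :=
  -- weights[len(assignemnt):] is List.drop (nonnegative start)
  (((weights.drop assignemnt.length).foldl find_exps_expand [(assignemnt, remaining)]).map Prod.fst)

-- ===== PRECONDITION & SPEC =====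
-- A raises IndexError (weights[len(assignemnt)]) when the assignment is longer than weights.
def Pre_find_exps (assignemnt : List Int) (remaining : Int) (weights : List Int) : Prop :=
  assignemnt.length ≤ weights.length
instance (assignemnt : List Int) (remaining : Int) (weights : List Int) : Decidable (Pre_find_exps assignemnt remaining weights) := by unfold Pre_find_exps; infer_instance

def pvWitness_find_exps : List Int × Int × List Int := ([], 3, [1, 2])

def Spec_find_exps (assignemnt : List Int) (remaining : Int) (weights : List Int) (out : List (List Int)) : Prop := out = find_exps_alt assignemnt remaining weights
instance (assignemnt : List Int) (remaining : Int) (weights : List Int) (out : List (List Int)) : Decidable (Spec_find_exps assignemnt remaining weights out) := by unfold Spec_find_exps; infer_instance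

-- ===== CLAIM (what is proved, stated in full; the proofs are below) =====
def Claim_equal_find_exps : Prop := ∀ (assignemnt : List Int) (remaining : Int) (weights : List Int), Dom_find_exps assignemnt remaining weights → Pre_find_exps assignemnt remaining weights → Spec_find_exps assignemnt remaining weights (find_exps assignemnt remaining weights)

-- ===== LEMMAS AND PROOFS =====

lemma expand_append (s₁ s₂ : List (List Int × Int)) (w : Int) :
    find_exps_expand (s₁ ++ s₂) w = find_exps_expand s₁ w ++ find_exps_expand s₂ w := by
  simp [find_exps_expand]

lemma foldl_expand_append (ws : List Int) (s₁ s₂ : List (List Int × Int)) :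
    ws.foldl find_exps_expand (s₁ ++ s₂) =
      ws.foldl find_exps_expand s₁ ++ ws.foldl find_exps_expand s₂ := by
  induction ws generalizing s₁ s₂ with
  | nil => rfl
  | cons w ws ih => simp [List.foldl, expand_append, ih]

lemma foldl_expand_flat (ws : List Int) (s : List (List Int × Int)) :
    ws.foldl find_exps_expand s =
      s.flatMap (fun c => ws.foldl find_exps_expand [c]) := by
  induction s with
  | nil =>
    induction ws with
    | nil => rfl
    | cons w ws ih => simpa [List.foldl, find_exps_expand] using ih
  | cons c s ih =>
    have : (c :: s) = [c] ++ s := rfl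
    rw [this, foldl_expand_append, ih]
    simp

-- infeasibility is monotone in j (for j, r ≥ 0)
lemma infeasible_mono {r w j i : Int} (hj : 0 ≤ j) (hr : 0 ≤ r)
    (hji : j ≤ i) (h : r - j * w < 0) : r - i * w < 0 := by
  have hw : 0 < w := by
    by_contra hw
    push_neg at hw
    have : j * w ≤ 0 := mul_nonpos_of_nonneg_of_nonpos hj hw
    omega
  have : j * w ≤ i * w := mul_le_mul_of_nonneg_right hji hw.le
  omega

-- the loop equals a filter of the range, flatMapped through the recursion
lemma loopA_eq (d : Nat) (a : List Int) (r : Int) (weights : List Int) (w : Int)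
    (f : Nat) (j : Int) (hj : 0 ≤ j) (hr : 0 ≤ r) :
    find_exps_loop d a r weights w f j =
      ((PySem.List.pyRange j (j + f) 1).filterMap
          (fun i => if 0 ≤ r - i * w then some i else none)).flatMap
        (fun i => find_exps_go d (a ++ [i]) (r - i * w) weights) := by
  induction f generalizing j with
  | zero => simp [find_exps_loop, PySem.List.pyRange_one_eq_nil (by omega : j + ((0:Nat):Int) ≤ j)]
  | succ f ih =>
    have hb : j + ((f + 1 : Nat) : Int) = j + 1 + (f : Int) := by push_cast; ring
    rw [hb, PySem.List.pyRange_one_cons (by omega : j < j + 1 + (f : Int))]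
    by_cases hfeas : r - j * w < 0
    · rw [find_exps_loop]
      simp only [hfeas, if_true]
      have hnil : ((PySem.List.pyRange (j + 1) (j + 1 + (f : Int)) 1).filterMap
          (fun i => if 0 ≤ r - i * w then some i else none)) = [] := by
        rw [List.filterMap_eq_nil_iff]
        intro i hi
        rw [PySem.List.mem_pyRange_one] at hi
        have : r - i * w < 0 := infeasible_mono hj hr (by omega) hfeas
        simp only [ite_eq_right_iff, reduceCtorEq, imp_false]
        omega
      rw [List.filterMap_cons, if_neg (by omega : ¬ 0 ≤ r - j * w), hnil]
      rfl
    · push_neg at hfeas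
      rw [find_exps_loop]
      simp only [if_neg (by omega : ¬ r - j * w < 0)]
      rw [List.filterMap_cons, if_pos hfeas, List.flatMap_cons, ih (j + 1) (by omega)]

-- rewrite B's one-level expansion of a single state as a map over the feasible j's
lemma filterMap_if_map (l : List Int) (P : Int → Prop) [DecidablePred P] (h : Int → List Int × Int) :
    l.filterMap (fun j => if P j then some (h j) else none) =
      (l.filterMap (fun j => if P j then some j else none)).map h := by
  induction l with
  | nil => rfl
  | cons x l ih =>
    by_cases hx : P x <;> simp [List.filterMap_cons, hx, ih]

-- main invariant: A's recursion equals B's fold, by induction on the number of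
-- weights still to assign
lemma main_eq : ∀ (k d : Nat) (a : List Int) (r : Int) (weights : List Int),
    weights.length - a.length = k → a.length ≤ weights.length → k < d →
    find_exps_go d a r weights =
      ((weights.drop a.length).foldl find_exps_expand [(a, r)]).map Prod.fst := by
  intro k
  induction k with
  | zero =>
    intro d a r weights hk hle hd
    obtain ⟨d', rfl⟩ : ∃ d', d = d' + 1 := ⟨d - 1, by omega⟩
    have hlen : a.length = weights.length := by omega
    rw [find_exps_go, if_pos hlen, List.drop_eq_nil_of_le (le_of_eq hlen.symm)]
    rfl
  | succ k ih =>
    intro d a r weights hk hle hd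
    obtain ⟨d', rfl⟩ : ∃ d', d = d' + 1 := ⟨d - 1, by omega⟩
    have hlt : a.length < weights.length := by omega
    have hget : PySem.List.pyGet? weights (a.length : Int) = some weights[a.length] :=
      PySem.List.pyGet?_ofNat weights a.length hlt
    have hdrop : weights.drop a.length = weights[a.length] :: weights.drop (a.length + 1) :=
      List.drop_eq_getElem_cons hlt
    rw [find_exps_go, if_neg (by omega), hget, hdrop]
    simp only [List.foldl_cons]
    set w := weights[a.length] with hw
    set ws := weights.drop (a.length + 1) with hws
    rw [foldl_expand_flat]
    have hexp : find_exps_expand [(a, r)] w =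
        ((PySem.List.pyRange 0 (r + 1) 1).filterMap
            (fun j => if 0 ≤ r - j * w then some j else none)).map
          (fun j => (a ++ [j], r - j * w)) := by
      rw [find_exps_expand]
      simp only [List.flatMap_cons, List.flatMap_nil, List.append_nil]
      exact filterMap_if_map _ _ _
    rw [hexp]
    by_cases hr : 0 ≤ r
    · rw [loopA_eq d' a r weights w ((r + 1).toNat) 0 le_rfl hr]
      rw [show ((0:Int) + (((r + 1).toNat : Nat) : Int)) = r + 1 by omega]
      rw [List.map_flatMap, List.flatMap_map]
      congr 1
      funext j
      have hchild := ih d' (a ++ [j]) (r - j * w) weights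
        (by simp [hws]; omega) (by simp; omega) (by omega)
      rw [hchild]
      simp [hws]
    · -- r < 0: loop fuel is 0 and the range is empty on both sides
      have h1 : ((r + 1).toNat) = 0 := by omega
      have h2 : PySem.List.pyRange 0 (r + 1) 1 = [] :=
        PySem.List.pyRange_one_eq_nil (by omega)
      rw [h1, h2]
      simp [find_exps_loop]

-- ===== VERDICT (by name: the statement is the Claim_ definition above) =====
theorem find_exps_spec : Claim_equal_find_exps := by
  intro a r weights _ hpre
  unfold Spec_find_exps find_exps find_exps_alt
  exact main_eq (weights.length - a.length) (weights.length + 1) a r weights rfl hpre (by omega)
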